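-- pv_equiv track=rewrite | github.com/jiji7879/AdventOfCode2024 | day2/day2.py | isIncreasingLineSafeWithOneBadLevel
-- ===== SOURCE A (Python) =====
-- def isIncreasingLineSafe(line: list, minDiff: int, maxDiff: int):
--     for index in range(len(line) - 1):
--         difference = line[index + 1] - line[index]
--         if difference > maxDiff or difference < minDiff:
--             return 0
--     return 1
--
-- def isIncreasingLineSafeWithOneBadLevel(line: list, minDiff: int, maxDiff: int):
--     safeOrUnsafe = []
--
--     # compare every number in between
--     for index in range(len(line) - 1):
--         difference = line[index + 1] - line[index]
--         if difference > maxDiff or difference < minDiff: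
--             safeOrUnsafe.append(0)
--         else:
--             safeOrUnsafe.append(1)
--
--     match safeOrUnsafe.count(0):
--         case 0:
--             return 1
--
--         # if only one unsafe, test both cases of removal
--         # ex: [1, 3, 3, 5]
--         # if multiple unsafes, the only way this can work is if there are two unsafes back to back
--         # ex: [1, 5, 2, 3] or [3, 1, 5, 7]
--         case 1 | 2:
--             index = safeOrUnsafe.index(0)
--             line1 = line[:index]+line[index+1:]
--             line2 = line[:index+1]+line[index+2:]
--             return max(isIncreasingLineSafe(line1, minDiff, maxDiff),
--                            isIncreasingLineSafe(line2, minDiff, maxDiff))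
--
--         case _:
--             return 0
-- ===== SOURCE B (Python) =====
-- def isIncreasingLineSafeWithOneBadLevel(line: list, minDiff: int, maxDiff: int):
--     def safe(xs):
--         return all(minDiff <= b - a <= maxDiff for a, b in zip(xs, xs[1:]))
--
--     if safe(line):
--         return 1
--     for i in range(len(line)):
--         if safe(line[:i] + line[i + 1:]):
--             return 1
--     return 0
-- ===== Notes on version B (the rewrite author's own statement) =====
-- stated objective: idiomatic
-- what changed: A counts unsafe adjacent differences in one pass and reasons about which removal near the first failure could help; B is the direct brute-force dampener: check the whole line, then try removing every index and re-check the remainder.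
import Mathlib
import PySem

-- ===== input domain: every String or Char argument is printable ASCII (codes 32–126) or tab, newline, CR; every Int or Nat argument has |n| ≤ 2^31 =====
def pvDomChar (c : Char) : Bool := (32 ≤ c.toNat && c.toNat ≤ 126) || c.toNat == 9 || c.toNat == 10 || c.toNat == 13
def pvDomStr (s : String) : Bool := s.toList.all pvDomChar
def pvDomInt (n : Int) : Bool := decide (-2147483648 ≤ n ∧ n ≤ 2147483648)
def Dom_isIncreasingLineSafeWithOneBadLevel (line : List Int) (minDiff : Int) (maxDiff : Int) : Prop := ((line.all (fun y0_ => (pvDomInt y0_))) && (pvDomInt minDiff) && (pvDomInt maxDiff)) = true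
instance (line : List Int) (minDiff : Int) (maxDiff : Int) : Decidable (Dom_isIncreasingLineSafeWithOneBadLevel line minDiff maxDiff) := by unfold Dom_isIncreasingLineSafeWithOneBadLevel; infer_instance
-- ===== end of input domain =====

-- B replaces A's single-pass failure-counting/first-failure-junction reasoning by the direct
-- brute-force dampener (check line, then try every single-element removal); equal return values.

-- ===== PORT A =====
-- helper isIncreasingLineSafe: the loop with early 'return 0' is the recursion pvLoopA over the index list
def pvLoopA (line : List Int) (minDiff maxDiff : Int) : List Nat → Int
  | [] => 1
  | index :: rest =>
      let difference := line.getD (index + 1) 0 - line.getD index 0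
      if difference > maxDiff ∨ difference < minDiff then 0
      else pvLoopA line minDiff maxDiff rest

def pvIsIncreasingLineSafe (line : List Int) (minDiff maxDiff : Int) : Int :=
  pvLoopA line minDiff maxDiff (List.range (line.length - 1))

def isIncreasingLineSafeWithOneBadLevel (line : List Int) (minDiff : Int) (maxDiff : Int) : Int :=
  let safeOrUnsafe : List Int :=
    (List.range (line.length - 1)).foldl (fun acc index =>
      let difference := line.getD (index + 1) 0 - line.getD index 0
      if difference > maxDiff ∨ difference < minDiff then acc ++ [0] else acc ++ [1]) []
  -- match safeOrUnsafe.count(0): case 0 / case 1|2 / case _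
  let c := PySem.List.count safeOrUnsafe 0
  if c = 0 then 1
  else if c = 1 ∨ c = 2 then
    let index : Nat := (PySem.List.index? safeOrUnsafe 0).getD 0
    let line1 := PySem.List.slice line none (some (index : Int)) ++
                 PySem.List.slice line (some ((index : Int) + 1)) none
    let line2 := PySem.List.slice line none (some ((index : Int) + 1)) ++
                 PySem.List.slice line (some ((index : Int) + 2)) none
    max (pvIsIncreasingLineSafe line1 minDiff maxDiff)
        (pvIsIncreasingLineSafe line2 minDiff maxDiff)
  else 0

-- ===== PORT B =====
-- safe(xs) = all(minDiff <= b - a <= maxDiff for a, b in zip(xs, xs[1:]))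
def pvSafeB (minDiff maxDiff : Int) (xs : List Int) : Bool :=
  (List.zip xs (PySem.List.slice xs (some 1) none)).all
    (fun p => decide (minDiff ≤ p.2 - p.1) && decide (p.2 - p.1 ≤ maxDiff))

def isIncreasingLineSafeWithOneBadLevel_alt (line : List Int) (minDiff : Int) (maxDiff : Int) : Int :=
  if pvSafeB minDiff maxDiff line then 1
  else if (List.range line.length).any (fun i =>
      pvSafeB minDiff maxDiff (PySem.List.slice line none (some (i : Int)) ++
                               PySem.List.slice line (some ((i : Int) + 1)) none)) then 1
  else 0

-- ===== PRECONDITION & SPEC =====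
def Spec_isIncreasingLineSafeWithOneBadLevel (line : List Int) (minDiff : Int) (maxDiff : Int) (out : Int) : Prop := out = isIncreasingLineSafeWithOneBadLevel_alt line minDiff maxDiff
instance (line : List Int) (minDiff : Int) (maxDiff : Int) (out : Int) : Decidable (Spec_isIncreasingLineSafeWithOneBadLevel line minDiff maxDiff out) := by unfold Spec_isIncreasingLineSafeWithOneBadLevel; infer_instance

-- ===== CLAIM (what is proved, stated in full; the proofs are below) =====
def Claim_equal_isIncreasingLineSafeWithOneBadLevel : Prop := ∀ (line : List Int) (minDiff : Int) (maxDiff : Int), Dom_isIncreasingLineSafeWithOneBadLevel line minDiff maxDiff → Spec_isIncreasingLineSafeWithOneBadLevel line minDiff maxDiff (isIncreasingLineSafeWithOneBadLevel line minDiff maxDiff)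

-- ===== LEMMAS AND PROOFS =====

-- 'pvBad line lo hi i': the adjacent difference at position i is out of the [lo, hi] band
def pvBad (line : List Int) (lo hi : Int) (i : Nat) : Bool :=
  decide (line.getD (i + 1) 0 - line.getD i 0 > hi ∨ line.getD (i + 1) 0 - line.getD i 0 < lo)

lemma pvLoopA_eq (line : List Int) (lo hi : Int) (l : List Nat) :
    pvLoopA line lo hi l = if l.any (pvBad line lo hi) then 0 else 1 := by
  induction l with
  | nil => simp [pvLoopA]
  | cons x xs ih =>
      simp only [pvLoopA, List.any_cons, ih, pvBad, Bool.or_eq_true, decide_eq_true_eq]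
      split_ifs <;> tauto

lemma safeOrUnsafe_eq (line : List Int) (lo hi : Int) (l : List Nat) (acc : List Int) :
    l.foldl (fun acc index =>
      if line.getD (index + 1) 0 - line.getD index 0 > hi ∨
         line.getD (index + 1) 0 - line.getD index 0 < lo then acc ++ [0] else acc ++ [1]) acc
    = acc ++ l.map (fun i => if pvBad line lo hi i then (0 : Int) else 1) := by
  induction l generalizing acc with
  | nil => simp
  | cons x xs ih =>
      rw [List.foldl_cons, ih, List.map_cons]
      have he : (if line.getD (x + 1) 0 - line.getD x 0 > hi ∨
          line.getD (x + 1) 0 - line.getD x 0 < lo then acc ++ [(0 : Int)] else acc ++ [1])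
          = acc ++ [if pvBad line lo hi x then (0 : Int) else 1] := by
        simp only [pvBad, decide_eq_true_eq]
        split_ifs <;> rfl
      rw [he, List.append_assoc]
      rfl

lemma count_indicator (p : Nat → Bool) (l : List Nat) :
    (l.map (fun i => if p i then (0 : Int) else 1)).count 0 = l.countP p := by
  induction l with
  | nil => simp
  | cons x xs ih =>
      by_cases h : p x <;> simp [List.count_cons, List.countP_cons, h, ih]

lemma pvSafeB_eq (lo hi : Int) (xs : List Int) :
    pvSafeB lo hi xs = !((List.range (xs.length - 1)).any (pvBad xs lo hi)) := by
  induction xs with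
  | nil => simp [pvSafeB]
  | cons a tl ih =>
      cases tl with
      | nil => simp [pvSafeB, PySem.List.slice_from_one]
      | cons b t =>
          rw [pvSafeB, PySem.List.slice_from_one] at *
          simp only [List.tail_cons, List.zip_cons_cons, List.all_cons] at *
          rw [ih]
          have hcomp : ∀ i : Nat, pvBad (a :: b :: t) lo hi (i + 1) = pvBad (b :: t) lo hi i := by
            intro i
            simp only [pvBad, List.getD_cons_succ]
          have hlen : (a :: b :: t).length - 1 = ((b :: t).length - 1) + 1 := by
            simp
          rw [hlen, List.range_succ_eq_map]
          simp only [List.any_cons, List.any_map, Function.comp_def, hcomp]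
          have h0 : pvBad (a :: b :: t) lo hi 0 = !(decide (lo ≤ b - a) && decide (b - a ≤ hi)) := by
            simp only [pvBad, List.getD_cons_succ, List.getD_cons_zero]
            by_cases h1 : lo ≤ b - a <;> by_cases h2 : b - a ≤ hi <;> simp [h1, h2] <;> omega
          rw [h0]
          cases hx : (decide (lo ≤ b - a) && decide (b - a ≤ hi)) <;> simp

lemma safeA_eq_safeB (xs : List Int) (lo hi : Int) :
    pvIsIncreasingLineSafe xs lo hi = if pvSafeB lo hi xs then 1 else 0 := by
  rw [pvIsIncreasingLineSafe, pvLoopA_eq, pvSafeB_eq]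
  cases h : (List.range (xs.length - 1)).any (pvBad xs lo hi) <;> simp [h]

lemma rm_length (line : List Int) (j : Nat) (hj : j < line.length) :
    (line.take j ++ line.drop (j + 1)).length = line.length - 1 := by
  simp; omega

lemma rm_getD (line : List Int) (j i : Nat) (hj : j < line.length) (hi : i < line.length - 1) :
    (line.take j ++ line.drop (j + 1)).getD i 0
      = if i < j then line.getD i 0 else line.getD (i + 1) 0 := by
  have hlt : (line.take j).length = j := by simp; omega
  have hlen : (line.take j ++ line.drop (j + 1)).length = line.length - 1 :=
    rm_length line j hj
  by_cases h : i < j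
  · rw [if_pos h]
    rw [List.getD_eq_getElem _ _ (by omega), List.getD_eq_getElem _ _ (by omega),
      List.getElem_append_left (by omega)]
    exact List.getElem_take
  · rw [if_neg h]
    rw [List.getD_eq_getElem _ _ (by omega), List.getD_eq_getElem _ _ (by omega),
      List.getElem_append_right (by omega), List.getElem_drop]
    congr 1
    omega

lemma persist (line : List Int) (lo hi : Int) (p j : Nat)
    (hp : p + 1 < line.length) (hb : pvBad line lo hi p = true)
    (hj : j < line.length) (hne1 : j ≠ p) (hne2 : j ≠ p + 1) :
    pvSafeB lo hi (line.take j ++ line.drop (j + 1)) = false := by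
  have hP : line.getD (p + 1) 0 - line.getD p 0 > hi ∨
      line.getD (p + 1) 0 - line.getD p 0 < lo := by simpa [pvBad] using hb
  rw [pvSafeB_eq, rm_length line j hj, Bool.not_eq_false']
  rw [List.any_eq_true]
  by_cases hjp : j < p
  · -- removed element is left of the bad pair: it sits at positions (p-1, p)
    refine ⟨p - 1, List.mem_range.mpr (by omega), ?_⟩
    rw [pvBad, show p - 1 + 1 = p from by omega,
      rm_getD line j p hj (by omega), rm_getD line j (p - 1) hj (by omega)]
    rw [if_neg (by omega), if_neg (by omega), show p - 1 + 1 = p from by omega]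
    simpa using hP
  · -- here j ≥ p + 2: the bad pair stays at positions (p, p+1)
    have hj2 : p + 1 < j := by omega
    refine ⟨p, List.mem_range.mpr (by omega), ?_⟩
    rw [pvBad, rm_getD line j p hj (by omega), rm_getD line j (p + 1) hj (by omega)]
    rw [if_pos (by omega), if_pos (by omega)]
    simpa using hP

lemma length_le_one_of_nodup_const (l : List Nat) (b : Nat) (hnd : l.Nodup)
    (h : ∀ x ∈ l, x = b) : l.length ≤ 1 := by
  cases l with
  | nil => simp
  | cons y ys =>
      cases ys with
      | nil => simp
      | cons z zs =>
          exfalso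
          have hy : y = b := h y (by simp)
          have hz : z = b := h z (by simp)
          have := (List.nodup_cons.mp hnd).1
          simp [hy, hz] at this

lemma length_le_two_of_nodup (l : List Nat) (a b : Nat) (hnd : l.Nodup)
    (h : ∀ x ∈ l, x = a ∨ x = b) : l.length ≤ 2 := by
  cases l with
  | nil => simp
  | cons x xs =>
      have hx : x ∉ xs := (List.nodup_cons.mp hnd).1
      have hndxs : xs.Nodup := (List.nodup_cons.mp hnd).2
      have hlen : xs.length ≤ 1 := by
        rcases h x (by simp) with hxa | hxb
        · refine length_le_one_of_nodup_const xs b hndxs ?_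
          intro y hy
          rcases h y (by simp [hy]) with h1 | h1
          · exact absurd (hxa ▸ h1 ▸ hy) hx
          · exact h1
        · refine length_le_one_of_nodup_const xs a hndxs ?_
          intro y hy
          rcases h y (by simp [hy]) with h1 | h1
          · exact h1
          · exact absurd (hxb ▸ h1 ▸ hy) hx
      simp [List.length_cons]
      omega

lemma main_eq (line : List Int) (lo hi : Int) :
    isIncreasingLineSafeWithOneBadLevel line lo hi
      = isIncreasingLineSafeWithOneBadLevel_alt line lo hi := by
  have hcast1 : ∀ (i : Nat), ((i : Int) + 1) = (((i + 1 : Nat)) : Int) := by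
    intro i; push_cast; ring
  have hcast2 : ∀ (i : Nat), ((i : Int) + 2) = (((i + 2 : Nat)) : Int) := by
    intro i; push_cast; ring
  simp only [isIncreasingLineSafeWithOneBadLevel, isIncreasingLineSafeWithOneBadLevel_alt]
  rw [safeOrUnsafe_eq, PySem.List.count_eq]
  simp only [List.nil_append, hcast1, hcast2, PySem.List.slice_to_natCast,
    PySem.List.slice_from_natCast]
  rw [count_indicator]
  set n := line.length with hn
  set c := (List.range (n - 1)).countP (pvBad line lo hi) with hc
  by_cases hc0 : c = 0
  · -- no bad difference: both return 1
    have hnone : ∀ i ∈ List.range (n - 1), ¬ (pvBad line lo hi i = true) :=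
      List.countP_eq_zero.mp hc0
    have hsafe : pvSafeB lo hi line = true := by
      rw [pvSafeB_eq, Bool.not_eq_true']
      rw [List.any_eq_false]
      intro i hi2
      simpa using hnone i hi2
    rw [if_pos hc0, hsafe]
    simp
  · -- some bad difference exists: the original line is unsafe
    obtain ⟨p0, hp0mem, hp0bad⟩ := List.countP_pos_iff.mp (Nat.pos_of_ne_zero hc0)
    have hunsafe : pvSafeB lo hi line = false := by
      rw [pvSafeB_eq, Bool.not_eq_false']
      exact List.any_eq_true.mpr ⟨p0, hp0mem, hp0bad⟩
    rw [if_neg hc0, hunsafe]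
    -- locate the 0 that A's .index(0) finds: a bad position k
    have hmem0 : (0 : Int) ∈ (List.range (n - 1)).map
        (fun i => if pvBad line lo hi i then (0 : Int) else 1) := by
      refine List.mem_map.mpr ⟨p0, hp0mem, ?_⟩
      simp [hp0bad]
    cases hidx : PySem.List.index? ((List.range (n - 1)).map
        (fun i => if pvBad line lo hi i then (0 : Int) else 1)) 0 with
    | none =>
        exact absurd hmem0 ((PySem.List.index?_eq_none_iff _ _).mp hidx)
    | some k =>
        obtain ⟨hk, hk0, _⟩ := PySem.List.getElem_of_index?_eq_some hidx
        rw [List.length_map, List.length_range] at hk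
        have hkbad : pvBad line lo hi k = true := by
          rw [List.getElem_map, List.getElem_range] at hk0
          by_contra hcontra
          rw [Bool.not_eq_true] at hcontra
          rw [hcontra] at hk0
          simp at hk0
        have hkn : k + 1 < n := by omega
        by_cases hc12 : c = 1 ∨ c = 2
        · rw [if_pos hc12]
          simp only [Option.getD_some]
          rw [safeA_eq_safeB, safeA_eq_safeB]
          by_cases hS : pvSafeB lo hi (line.take k ++ line.drop (k + 1)) = true ∨
              pvSafeB lo hi (line.take (k + 1) ++ line.drop (k + 2)) = true
          · have hany : (List.range n).any (fun i =>
                pvSafeB lo hi (line.take i ++ line.drop (i + 1))) = true := by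
              rw [List.any_eq_true]
              rcases hS with h | h
              · exact ⟨k, List.mem_range.mpr (by omega), h⟩
              · exact ⟨k + 1, List.mem_range.mpr (by omega), h⟩
            rw [hany]
            rcases hS with h | h
            · rw [h]
              cases hx : pvSafeB lo hi (line.take (k + 1) ++ line.drop (k + 2)) <;>
                simp [hx]
            · rw [h]
              cases hx : pvSafeB lo hi (line.take k ++ line.drop (k + 1)) <;> simp [hx]
          · push_neg at hS
            obtain ⟨h1, h2⟩ := hS
            simp only [ne_eq, Bool.not_eq_true] at h1 h2
            have hany : (List.range n).any (fun i =>
                pvSafeB lo hi (line.take i ++ line.drop (i + 1))) = false := by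
              rw [List.any_eq_false]
              intro j hjmem
              rw [Bool.not_eq_true]
              have hjn : j < n := List.mem_range.mp hjmem
              by_cases hjk : j = k
              · rw [hjk]; exact h1
              · by_cases hjk1 : j = k + 1
                · rw [hjk1]; exact h2
                · exact persist line lo hi k j hkn hkbad hjn hjk hjk1
            rw [hany, h1, h2]
            simp
        · rw [if_neg hc12]
          have hc3 : 3 ≤ c := by omega
          have hany : (List.range n).any (fun i =>
              pvSafeB lo hi (line.take i ++ line.drop (i + 1))) = false := by
            rw [List.any_eq_false]
            intro j hjmem
            rw [Bool.not_eq_true]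
            have hjn : j < n := List.mem_range.mp hjmem
            -- at least three bad positions, so one of them avoids {j-1, j}
            by_cases hex : ∃ p ∈ List.range (n - 1),
                pvBad line lo hi p = true ∧ p ≠ j ∧ p ≠ j - 1
            · obtain ⟨p, hpmem, hpbad, hpj, hpj1⟩ := hex
              have hpn : p + 1 < n := by
                have := List.mem_range.mp hpmem; omega
              exact persist line lo hi p j hpn hpbad hjn (by omega) (by omega)
            · exfalso
              push_neg at hex
              have hsub : ∀ x ∈ (List.range (n - 1)).filter (pvBad line lo hi),
                  x = j ∨ x = j - 1 := by
                intro x hx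
                have hm := List.mem_filter.mp hx
                by_contra hcon
                push_neg at hcon
                exact hcon.2 (hex x hm.1 hm.2 hcon.1)
              have hnd : ((List.range (n - 1)).filter (pvBad line lo hi)).Nodup :=
                List.Nodup.filter _ List.nodup_range
              have hlen2 := length_le_two_of_nodup _ j (j - 1) hnd hsub
              rw [List.countP_eq_length_filter] at hc
              omega
          rw [hany]
          simp

-- ===== VERDICT (by name: the statement is the Claim_ definition above) =====
theorem isIncreasingLineSafeWithOneBadLevel_spec : Claim_equal_isIncreasingLineSafeWithOneBadLevel := by
  intro line minDiff maxDiff _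
  exact main_eq line minDiff maxDiff
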